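-- pv_equiv track=rewrite | github.com/kimhn0605/Programmers | Kakao/신규 아이디 추천.py | FinalProcess
-- ===== SOURCE A (Python) =====
-- def FinalProcess(new_id) :      # 조건 5 ~ 7단계
--     if len(new_id) == 0 :
--         new_id = 'a'
--     elif len(new_id) >= 16 :
--         new_id = new_id[:15]
--         new_id = new_id.rstrip('.')
--     if len(new_id) <= 2 :
--         while (True) :
--             if len(new_id) == 3 :
--                 break
--             else :
--                 new_id += new_id[-1]
--     return new_id
-- ===== SOURCE B (Python) =====
-- def FinalProcess(new_id):
--     # Recursive rewrite system: apply the first applicable normalization rule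
--     # and recurse until no rule applies, instead of A's staged if/elif passes
--     # plus a while-loop.  Where A raises IndexError (length >= 16 with the
--     # first 15 chars all '.'), the fixpoint naturally reaches 'aaa'.
--     if len(new_id) == 0:
--         return FinalProcess('a')
--     if len(new_id) >= 16:
--         return FinalProcess(new_id[:15].rstrip('.'))
--     if len(new_id) < 3:
--         return FinalProcess(new_id + new_id[-1])
--     return new_id
-- ===== Notes on version B (the rewrite author's own statement) =====
-- stated objective: alternative
-- what changed: B is a recursive rewrite-to-fixpoint normalizer (one rule per call, every guard re-checked on each recursion) instead of A's one-shot staged if/elif passes followed by a while-True padding loop; the recursion also makes B total where A is not.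
import Mathlib
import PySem

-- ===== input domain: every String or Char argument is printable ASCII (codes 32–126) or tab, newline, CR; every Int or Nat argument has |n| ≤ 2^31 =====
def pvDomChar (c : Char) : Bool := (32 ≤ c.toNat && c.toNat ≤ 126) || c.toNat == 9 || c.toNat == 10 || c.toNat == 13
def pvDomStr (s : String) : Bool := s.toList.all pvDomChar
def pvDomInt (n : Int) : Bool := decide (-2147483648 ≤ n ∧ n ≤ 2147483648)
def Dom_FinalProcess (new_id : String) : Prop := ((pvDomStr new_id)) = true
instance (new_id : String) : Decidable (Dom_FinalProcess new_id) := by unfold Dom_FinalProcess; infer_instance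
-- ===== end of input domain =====

-- B normalizes by a recursive rewrite-to-fixpoint instead of A's staged passes + while-loop; return values only.

-- s.rstrip('.') on a list of chars: drop trailing '.' (exact: rstrip with an explicit
-- char set removes exactly the maximal trailing run of those chars).
def rstripDot (cs : List Char) : List Char :=
  (cs.reverse.dropWhile (· == '.')).reverse

-- ===== PORT A =====
-- A's 'while True' loop: breaks at length 3, else appends new_id[-1].  Entered only
-- with length ≤ 2, so fuel 3 suffices; pyGet? = none is where Python raises IndexError
-- (excluded by Pre_), the loop state is returned unchanged there.
def padLoopA : Nat → List Char → List Char
  | 0, s => s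
  | fuel + 1, s =>
      if s.length = 3 then s
      else
        match PySem.List.pyGet? s (-1) with
        | none => s
        | some c => padLoopA fuel (s ++ [c])

-- the 'if len == 0 / elif len >= 16' block
def truncA (s : List Char) : List Char :=
  if s.length = 0 then ['a']
  else if 16 ≤ s.length then rstripDot (PySem.List.slice s none (some 15))
  else s

def FinalProcess (new_id : String) : String :=
  String.ofList (if (truncA new_id.toList).length ≤ 2
                 then padLoopA 3 (truncA new_id.toList)
                 else truncA new_id.toList)

-- ===== PORT B =====
-- Source B's recursive normalizer, one rule per call; fuel only makes the recursion total
-- in Lean (depth is ≤ 6: the ≥16 rule fires at most once, then at most 0→1→2→3).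
def normB : Nat → List Char → List Char
  | 0, s => s
  | fuel + 1, s =>
      if s.length = 0 then normB fuel ['a']
      else if 16 ≤ s.length then normB fuel (rstripDot (PySem.List.slice s none (some 15)))
      else if s.length < 3 then normB fuel (s ++ [(PySem.List.pyGet? s (-1)).getD 'a'])
      else s

def FinalProcess_alt (new_id : String) : String :=
  String.ofList (normB 8 new_id.toList)

-- ===== PRECONDITION & SPEC =====
-- Pre_ excludes exactly the inputs where A raises IndexError (B returns "aaa" there):
-- length ≥ 16 with the first 15 characters all '.', so truncation + rstrip('.') leaves
-- the empty string and new_id[-1] fails.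
def Pre_FinalProcess (new_id : String) : Prop :=
  16 ≤ new_id.toList.length → ¬ (new_id.toList.take 15).all (· == '.')
instance (new_id : String) : Decidable (Pre_FinalProcess new_id) := by
  unfold Pre_FinalProcess; infer_instance

def pvWitness_FinalProcess : String := "ab"

def Spec_FinalProcess (new_id : String) (out : String) : Prop := out = FinalProcess_alt new_id
instance (new_id : String) (out : String) : Decidable (Spec_FinalProcess new_id out) := by unfold Spec_FinalProcess; infer_instance

-- ===== CLAIM (what is proved, stated in full; the proofs are below) =====
def Claim_equal_FinalProcess : Prop := ∀ (new_id : String), Dom_FinalProcess new_id → Pre_FinalProcess new_id → Spec_FinalProcess new_id (FinalProcess new_id)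

-- ===== LEMMAS AND PROOFS =====

theorem rstripDot_eq_nil_iff (cs : List Char) :
    rstripDot cs = [] ↔ cs.all (· == '.') := by
  unfold rstripDot
  rw [List.reverse_eq_nil_iff, List.dropWhile_eq_nil_iff]
  simp [List.all_eq_true]

-- single rewrite steps of normB (unfold only the left-hand side)
theorem normB_step16 (f : Nat) (s : List Char) (h0 : ¬ s.length = 0) (h16 : 16 ≤ s.length) :
    normB (f + 1) s = normB f (rstripDot (PySem.List.slice s none (some 15))) := by
  conv_lhs => unfold normB
  rw [if_neg h0, if_pos h16]

-- fixpoint: nothing rewrites a string of length 3..15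
theorem normB_big (f : Nat) (s : List Char) (h3 : 3 ≤ s.length) (h16 : s.length < 16) :
    normB (f + 1) s = s := by
  unfold normB
  rw [if_neg (by omega), if_neg (by omega), if_neg (by omega)]

-- B's padding rules reach the same closed form as A's loop on nonempty s, |s| ≤ 2
theorem normB_small (f : Nat) (s : List Char) (hne : s ≠ []) (hle : s.length ≤ 2) :
    normB (f + 3) s
      = s ++ List.replicate (3 - s.length) ((PySem.List.pyGet? s (-1)).getD 'a') := by
  match s, hne with
  | [a], _ =>
      simp [normB, PySem.List.pyGet?, PySem.List.pyIdx?, ]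
  | [a, b], _ =>
      simp [normB, PySem.List.pyGet?, PySem.List.pyIdx?, ]
  | a :: b :: c :: rest, _ =>
      simp at hle

-- A's loop agrees with the same closed form on nonempty lists of length ≤ 2.
theorem padLoopA_eq (s : List Char) (hne : s ≠ []) (hle : s.length ≤ 2) :
    padLoopA 3 s = s ++ List.replicate (3 - s.length) ((PySem.List.pyGet? s (-1)).getD 'a') := by
  match s, hne with
  | [a], _ =>
      simp [padLoopA, PySem.List.pyGet?, PySem.List.pyIdx?]
  | [a, b], _ =>
      simp [padLoopA, PySem.List.pyGet?, PySem.List.pyIdx?]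
  | a :: b :: c :: rest, _ =>
      simp at hle

-- after one rewrite step, fuel 7 finishes: normB on a nonempty list of length ≤ 15
theorem normB7 (s : List Char) (hne : s ≠ []) (h16 : s.length < 16) :
    normB 7 s = (if s.length ≤ 2
                 then s ++ List.replicate (3 - s.length) ((PySem.List.pyGet? s (-1)).getD 'a')
                 else s) := by
  by_cases hle : s.length ≤ 2
  · rw [if_pos hle, show (7 : Nat) = 4 + 3 from rfl, normB_small 4 s hne hle]
  · rw [if_neg hle, show (7 : Nat) = 6 + 1 from rfl, normB_big 6 s (by omega) h16]

-- ===== VERDICT (by name: the statement is the Claim_ definition above) =====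
theorem FinalProcess_spec : Claim_equal_FinalProcess := by
  intro new_id _ hpre
  unfold Spec_FinalProcess FinalProcess FinalProcess_alt
  set s := new_id.toList with hs
  by_cases h0 : s.length = 0
  · -- empty input: both normalize to "aaa"
    have h : s = [] := List.eq_nil_of_length_eq_zero h0
    simp [h, truncA, padLoopA, normB, PySem.List.pyGet?, PySem.List.pyIdx?]
  · by_cases h16 : 16 ≤ s.length
    · -- truncate rule; by Pre_, the stripped result is nonempty
      have hia : ¬ (s.take 15).all (· == '.') := hpre h16
      have hsl : PySem.List.slice s none (some 15) = s.take 15 := by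
        rw [PySem.List.slice_to s (by norm_num : (0:Int) ≤ 15)]; rfl
      set t := rstripDot (PySem.List.slice s none (some 15)) with ht
      have hne : t ≠ [] := by
        rw [ht, hsl]; intro h; exact hia ((rstripDot_eq_nil_iff _).mp h)
      have htlen : t.length < 16 := by
        have h1 : t.length ≤ (PySem.List.slice s none (some 15)).length := by
          rw [ht]; unfold rstripDot
          simpa using List.length_dropWhile_le (· == '.') (PySem.List.slice s none (some 15)).reverse
        rw [hsl] at h1
        have := List.length_take_le 15 s
        omega
      have hA : truncA s = t := by simp [truncA, h0, h16, ht]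
      have hB : normB 8 s = normB 7 t := by
        rw [show (8 : Nat) = 7 + 1 from rfl, normB_step16 7 s h0 h16, ht]
      rw [hA, hB, normB7 t hne htlen]
      by_cases hL : t.length ≤ 2
      · rw [if_pos hL, if_pos hL, padLoopA_eq t hne hL]
      · rw [if_neg hL, if_neg hL]
    · -- short nonempty input, no rewrite for length ≥ 3, pad rule below 3
      have hne : s ≠ [] := by intro h; exact h0 (by simp [h])
      have hA : truncA s = s := by simp [truncA, h0, h16]
      rw [hA]
      by_cases hL : s.length ≤ 2
      · rw [if_pos hL, padLoopA_eq s hne hL,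
            show normB 8 s = s ++ List.replicate (3 - s.length) ((PySem.List.pyGet? s (-1)).getD 'a')
              from by rw [show (8 : Nat) = 5 + 3 from rfl, normB_small 5 s hne hL]]
      · rw [if_neg hL, show normB 8 s = s
              from by rw [show (8 : Nat) = 7 + 1 from rfl, normB_big 7 s (by omega) (by omega)]]
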